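-- pv_equiv track=rewrite | github.com/sdarive/GenOps-AI | examples/governance_scenarios/compliance_audit_trail.py | _determine_compliance_status
-- ===== SOURCE A (Python) =====
-- from typing import Dict, Any, List, Optional
--
-- def _determine_compliance_status(
--     scores: Dict[str, float], policy_results: List[Dict[str, Any]]
-- ) -> str:
--     """Determine overall compliance status."""
--
--     # Check for blocking violations
--     blocking_violations = [r for r in policy_results if r.get('severity') == 'error']
--     if blocking_violations:
--         return 'non_compliant'
--
--     # Check for warnings
--     warnings = [r for r in policy_results if r.get('severity') == 'warning']
--     if warnings:
--         return 'compliant_with_warnings'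
--
--     return 'compliant'
-- ===== SOURCE B (Python) =====
-- from typing import Dict, Any, List
--
-- _RANK = {'error': 2, 'warning': 1}
-- _STATUS = ('compliant', 'compliant_with_warnings', 'non_compliant')
--
-- def _determine_compliance_status(
--     scores: Dict[str, float], policy_results: List[Dict[str, Any]]
-- ) -> str:
--     """Encode severities numerically and pick the status for the worst rank."""
--     worst = max((_RANK.get(r.get('severity'), 0) for r in policy_results), default=0)
--     return _STATUS[worst]
-- ===== Notes on version B (the rewrite author's own statement) =====
-- stated objective: alternative
-- what changed: Instead of filtering the records twice and branching, B maps each record's severity to a numeric rank (error=2, warning=1, other=0), takes the maximum rank by a single max-reduction, and indexes a status table with it.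
import Mathlib
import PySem

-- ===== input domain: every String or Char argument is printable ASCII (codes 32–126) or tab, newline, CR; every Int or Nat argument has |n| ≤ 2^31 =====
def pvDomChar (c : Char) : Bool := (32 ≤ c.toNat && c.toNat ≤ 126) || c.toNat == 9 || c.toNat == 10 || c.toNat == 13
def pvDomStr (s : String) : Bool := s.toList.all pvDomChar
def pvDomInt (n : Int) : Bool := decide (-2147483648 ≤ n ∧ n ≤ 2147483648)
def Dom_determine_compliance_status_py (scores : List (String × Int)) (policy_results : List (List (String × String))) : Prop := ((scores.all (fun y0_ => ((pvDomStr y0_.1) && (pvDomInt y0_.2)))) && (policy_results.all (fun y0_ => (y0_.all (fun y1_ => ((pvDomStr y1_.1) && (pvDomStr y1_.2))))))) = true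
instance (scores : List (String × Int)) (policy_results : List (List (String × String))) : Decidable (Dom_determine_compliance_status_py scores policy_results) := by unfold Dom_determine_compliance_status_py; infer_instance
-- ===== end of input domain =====

-- B replaces A's two filtering comprehensions by a numeric severity ranking: max rank, then a table lookup (alternative decomposition).
-- ===== PORT A =====
-- r.get('severity'): first-match lookup in the association list (dict in insertion order)
def pvGetSeverity (r : List (String × String)) : Option String :=
  (r.find? (fun kv => kv.1 == "severity")).map Prod.snd

def determine_compliance_status_py (scores : List (String × Int)) (policy_results : List (List (String × String))) : String :=
  let blocking_violations := policy_results.filter (fun r => pvGetSeverity r == some "error")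
  if blocking_violations ≠ [] then "non_compliant"
  else
    let warnings := policy_results.filter (fun r => pvGetSeverity r == some "warning")
    if warnings ≠ [] then "compliant_with_warnings"
    else "compliant"

-- ===== PORT B =====
-- _RANK.get(sev, 0): the dict lookup on the (possibly absent) severity value, exact
def pvRank (r : List (String × String)) : Nat :=
  match pvGetSeverity r with
  | some "error" => 2
  | some "warning" => 1
  | _ => 0

-- max(generator, default=0) ported as a foldl max over the ranks; _STATUS[worst] as list indexing
def determine_compliance_status_py_alt (scores : List (String × Int)) (policy_results : List (List (String × String))) : String :=
  let worst := policy_results.foldl (fun w r => max w (pvRank r)) 0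
  ["compliant", "compliant_with_warnings", "non_compliant"].getD worst ""

-- ===== PRECONDITION & SPEC =====
def Spec_determine_compliance_status_py (scores : List (String × Int)) (policy_results : List (List (String × String))) (out : String) : Prop := out = determine_compliance_status_py_alt scores policy_results
instance (scores : List (String × Int)) (policy_results : List (List (String × String))) (out : String) : Decidable (Spec_determine_compliance_status_py scores policy_results out) := by unfold Spec_determine_compliance_status_py; infer_instance

-- ===== CLAIM (what is proved, stated in full; the proofs are below) =====
def Claim_equal_determine_compliance_status_py : Prop := ∀ (scores : List (String × Int)) (policy_results : List (List (String × String))), Dom_determine_compliance_status_py scores policy_results → Spec_determine_compliance_status_py scores policy_results (determine_compliance_status_py scores policy_results)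

-- ===== LEMMAS AND PROOFS =====

-- the max-fold computes exactly: 2 if any error, else 1 if any warning, else 0
theorem pv_fold_max (l : List (List (String × String))) (w : Nat) (hw : w ≤ 2) :
    l.foldl (fun w r => max w (pvRank r)) w
      = if l.any (fun r => pvGetSeverity r == some "error") then 2
        else if l.any (fun r => pvGetSeverity r == some "warning") then max w 1
        else w := by
  induction l generalizing w with
  | nil => simp
  | cons r t ih =>
    simp only [List.foldl_cons, List.any_cons]
    by_cases he : (pvGetSeverity r == some "error") = true
    · have hr : pvRank r = 2 := by
        unfold pvRank; rw [eq_of_beq he]; rfl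
      rw [hr, ih _ (by omega)]
      have : max w 2 = 2 := by omega
      split_ifs <;> simp_all <;> omega
    · by_cases hwn : (pvGetSeverity r == some "warning") = true
      · have hr : pvRank r = 1 := by
          unfold pvRank; rw [eq_of_beq hwn]; rfl
        rw [hr, ih _ (by omega)]
        simp only [he, hwn, Bool.false_or, Bool.true_or, if_true]
        split_ifs <;> omega
      · have hr : pvRank r = 0 := by
          unfold pvRank
          cases hs : pvGetSeverity r with
          | none => rfl
          | some s =>
            rw [hs] at he hwn
            simp only [beq_iff_eq, Option.some.injEq] at he hwn
            simp [he, hwn]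
        rw [hr, show max w 0 = w from by omega, ih _ hw]
        simp [he, hwn]

theorem pv_any_filter (p : List (String × String) → Bool) (l : List (List (String × String))) :
    (l.any p) = decide (l.filter p ≠ []) := by
  cases h : l.any p <;> simp_all [List.any_eq_true, List.filter_eq_nil_iff]

-- ===== VERDICT (by name: the statement is the Claim_ definition above) =====
theorem determine_compliance_status_py_spec : Claim_equal_determine_compliance_status_py := by
  intro scores policy_results _
  unfold Spec_determine_compliance_status_py determine_compliance_status_py
    determine_compliance_status_py_alt
  rw [pv_fold_max _ 0 (by omega),
      pv_any_filter (fun r => pvGetSeverity r == some "error"),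
      pv_any_filter (fun r => pvGetSeverity r == some "warning")]
  split_ifs <;> simp_all
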